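-- pv_equiv track=rewrite | github.com/popsyren27/Arch-PyCLI | plugins/vault.py | _clean_key
-- ===== SOURCE A (Python) =====
-- MAX_KEY_LENGTH: int = 128  # Maximum key name length
--
-- VALID_KEY_CHARS: set = set("abcdefghijklmnopqrstuvwxyzABCDEFGHIJKLMNOPQRSTUVWXYZ0123456789-_")
--
-- def _clean_key(key: str) -> str:
--     """
--     Clean and validate a key name.
--
--     Keys are restricted to alphanumeric characters, dashes, and underscores.
--
--     Args:
--         key: Raw key string
--
--     Returns:
--         Cleaned key string
--
--     Example:
--         >>> _clean_key("my-key_123")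
--         'my-key_123'
--     """
--     if not key:
--         return ""
--
--     # Filter to valid characters
--     cleaned: str = "".join(
--         char for char in key
--         if char in VALID_KEY_CHARS
--     )
--
--     # Limit length
--     return cleaned[:MAX_KEY_LENGTH]
-- ===== SOURCE B (Python) =====
-- MAX_KEY_LENGTH: int = 128
--
-- VALID_KEY_CHARS: set = set("abcdefghijklmnopqrstuvwxyzABCDEFGHIJKLMNOPQRSTUVWXYZ0123456789-_")
--
--
-- def _clean_key(key: str) -> str:
--     # Run-based scan: instead of testing every character into one filtered string,
--     # walk the string with an index, grab each maximal run of consecutive valid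
--     # characters as a slice, join the runs, and truncate to MAX_KEY_LENGTH.
--     if not key:
--         return ""
--     parts = []
--     i = 0
--     n = len(key)
--     while i < n:
--         if key[i] in VALID_KEY_CHARS:
--             j = i + 1
--             while j < n and key[j] in VALID_KEY_CHARS:
--                 j += 1
--             parts.append(key[i:j])
--             i = j
--         else:
--             i += 1
--     return "".join(parts)[:MAX_KEY_LENGTH]
-- ===== Notes on version B (the rewrite author's own statement) =====
-- stated objective: alternative
-- what changed: B replaces the per-character filter comprehension by an index-driven run scanner: it extracts each maximal run of consecutive valid characters as a slice, joins the run list, and truncates; same O(n) cost, different traversal and intermediate data (list of substrings vs one char-filtered string).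
import Mathlib
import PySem

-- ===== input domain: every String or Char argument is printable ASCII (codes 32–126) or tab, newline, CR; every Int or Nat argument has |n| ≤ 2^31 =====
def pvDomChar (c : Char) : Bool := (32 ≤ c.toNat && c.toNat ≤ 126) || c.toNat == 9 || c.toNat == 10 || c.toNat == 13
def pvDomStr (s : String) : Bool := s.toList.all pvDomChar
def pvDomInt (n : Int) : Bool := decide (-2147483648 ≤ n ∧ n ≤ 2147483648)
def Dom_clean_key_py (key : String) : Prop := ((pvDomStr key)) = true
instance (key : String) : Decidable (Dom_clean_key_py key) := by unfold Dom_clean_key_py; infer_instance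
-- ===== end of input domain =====

-- B scans the string by maximal runs of valid characters (collected as slices) and joins them,
-- instead of filtering character by character; same O(n) cost, different traversal (alternative).

-- ===== PORT A =====
-- set("abc…_") in Python insertion-dedup order; all 64 chars are distinct
def pvValidKeyChars : List Char :=
  PySem.Set.ofList "abcdefghijklmnopqrstuvwxyzABCDEFGHIJKLMNOPQRSTUVWXYZ0123456789-_".toList

-- A: filter the whole string to the valid characters, then slice [:128]
def clean_key_py (key : String) : String :=
  if key.toList = [] then "" else
    let cleaned : List Char := key.toList.filter (fun c => PySem.Set.contains pvValidKeyChars c)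
    String.ofList (PySem.List.slice cleaned none (some 128))

-- ===== PORT B =====
-- B's outer while loop: on a valid char, the inner while (j advancing over valid
-- chars) is the takeWhile, the slice key[i:j] is the collected run, and i = j
-- resumes at the dropWhile; on an invalid char, i advances by one.
def pvRuns (cs : List Char) : List (List Char) :=
  match cs with
  | [] => []
  | c :: rest =>
    if PySem.Set.contains pvValidKeyChars c then
      (c :: rest.takeWhile (fun d => PySem.Set.contains pvValidKeyChars d)) ::
        pvRuns (rest.dropWhile (fun d => PySem.Set.contains pvValidKeyChars d))
    else pvRuns rest
termination_by cs.length
decreasing_by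
  · have := List.length_dropWhile_le (p := fun d => PySem.Set.contains pvValidKeyChars d) (l := rest)
    simp at *; omega
  · simp

def clean_key_py_alt (key : String) : String :=
  if key.toList = [] then "" else
    String.ofList (PySem.List.slice ((pvRuns key.toList).flatten) none (some 128))

-- ===== PRECONDITION & SPEC =====
def Spec_clean_key_py (key : String) (out : String) : Prop := out = clean_key_py_alt key
instance (key : String) (out : String) : Decidable (Spec_clean_key_py key out) := by unfold Spec_clean_key_py; infer_instance

-- ===== CLAIM (what is proved, stated in full; the proofs are below) =====
def Claim_equal_clean_key_py : Prop := ∀ (key : String), Dom_clean_key_py key → Spec_clean_key_py key (clean_key_py key)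

-- ===== LEMMAS AND PROOFS =====

theorem pv_takeWhile_filter_dropWhile {α : Type} (p : α → Bool) (l : List α) :
    l.takeWhile p ++ (l.dropWhile p).filter p = l.filter p := by
  induction l with
  | nil => simp
  | cons a t ih =>
    by_cases h : p a = true
    · simp [h, ih]
    · simp [h]

theorem pvRuns_flatten (cs : List Char) :
    (pvRuns cs).flatten = cs.filter (fun c => PySem.Set.contains pvValidKeyChars c) := by
  fun_induction pvRuns cs with
  | case1 => rfl
  | case2 c rest h ih =>
    rw [List.flatten_cons, List.cons_append, List.filter_cons_of_pos h, ih,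
        pv_takeWhile_filter_dropWhile]
  | case3 c rest h ih =>
    rw [ih, List.filter_cons_of_neg h]

-- ===== VERDICT (by name: the statement is the Claim_ definition above) =====
theorem clean_key_py_spec : Claim_equal_clean_key_py := by
  intro key _
  unfold Spec_clean_key_py clean_key_py clean_key_py_alt
  by_cases h : key.toList = []
  · simp [h]
  · simp [h, pvRuns_flatten]
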